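-- pv_equiv track=rewrite | github.com/nata2627/anglicism_detection | create_ethalon/main.py | has_dot_before
-- ===== SOURCE A (Python) =====
-- def has_dot_before(text, word_pos):
--     # Если слово в начале текста, то перед ним точки нет
--     if word_pos == 0:
--         return False
--
--     # Проверяем символы перед началом слова
--     for i in range(word_pos - 1, -1, -1):
--         if text[i].isspace():
--             continue
--         return text[i] == '.' or text[i] == '!' or text[i] == '?'
--
--     return False
-- ===== SOURCE B (Python) =====
-- def has_dot_before(text, word_pos):
--     # A word at (or before) the start of the text has nothing before it.
--     if word_pos <= 0:
--         return False
--     # Single forward pass over the prefix: remember the last non-whitespace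
--     # character seen; whitespace between it and the word is irrelevant.
--     last = None
--     for ch in text[:word_pos]:
--         if not ch.isspace():
--             last = ch
--     return last in ('.', '!', '?')
-- ===== Notes on version B (the rewrite author's own statement) =====
-- stated objective: alternative
-- what changed: Replaces A's backward early-return index scan from word_pos-1 with a single forward pass over the prefix that maintains the last non-whitespace character seen in an accumulator and tests it once at the end.
import Mathlib
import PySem

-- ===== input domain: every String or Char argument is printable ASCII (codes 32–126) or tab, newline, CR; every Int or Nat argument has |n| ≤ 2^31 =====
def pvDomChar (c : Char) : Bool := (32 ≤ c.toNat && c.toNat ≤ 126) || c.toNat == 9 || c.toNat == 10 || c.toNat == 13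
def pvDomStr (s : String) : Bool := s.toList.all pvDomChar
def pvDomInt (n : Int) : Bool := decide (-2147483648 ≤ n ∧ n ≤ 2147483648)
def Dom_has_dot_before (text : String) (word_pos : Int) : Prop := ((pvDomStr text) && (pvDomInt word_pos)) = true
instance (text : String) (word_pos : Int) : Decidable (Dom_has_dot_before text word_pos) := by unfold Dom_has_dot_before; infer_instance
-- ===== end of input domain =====

-- B replaces A's backward early-return index scan with a single forward pass over the
-- prefix keeping the last non-whitespace character in an accumulator (objective: alternative).

-- ===== PORT A =====
-- the 'for i in range(word_pos-1,-1,-1)' loop: skip whitespace, return the test at the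
-- first non-space character; 'none' from pyGet? is IndexError (excluded by Pre_).
def hasDotLoopA (cs : List Char) : List Int → Bool
  | [] => false
  | i :: rest =>
    match PySem.List.pyGet? cs i with
    | none => false
    | some c =>
      if PySem.Chars.isspace c then hasDotLoopA cs rest
      else (c == '.' || c == '!' || c == '?')

def has_dot_before (text : String) (word_pos : Int) : Bool :=
  if word_pos = 0 then false
  else hasDotLoopA text.toList (PySem.List.pyRange (word_pos - 1) (-1) (-1))

-- ===== PORT B =====
-- 'last = None; for ch in text[:word_pos]: if not ch.isspace(): last = ch'
def scanLastB (cs : List Char) : Option Char :=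
  cs.foldl (fun acc c => if !(PySem.Chars.isspace c) then some c else acc) none

def has_dot_before_alt (text : String) (word_pos : Int) : Bool :=
  if word_pos ≤ 0 then false
  else
    -- 'last in ('.', '!', '?')': None is never one of the three characters
    match scanLastB (PySem.List.slice text.toList none (some word_pos)) with
    | none => false
    | some c => c == '.' || c == '!' || c == '?'

-- ===== PRECONDITION & SPEC =====
-- A indexes text[word_pos-1], so it raises IndexError when word_pos exceeds len(text);
-- exactly those inputs are excluded.
def Pre_has_dot_before (text : String) (word_pos : Int) : Prop :=
  word_pos ≤ (text.toList.length : Int)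
instance (text : String) (word_pos : Int) : Decidable (Pre_has_dot_before text word_pos) := by
  unfold Pre_has_dot_before; infer_instance

def pvWitness_has_dot_before : String × Int := ("a. b", 3)

def Spec_has_dot_before (text : String) (word_pos : Int) (out : Bool) : Prop :=
  out = has_dot_before_alt text word_pos
instance (text : String) (word_pos : Int) (out : Bool) : Decidable (Spec_has_dot_before text word_pos out) := by
  unfold Spec_has_dot_before; infer_instance

-- ===== CLAIM (what is proved, stated in full; the proofs are below) =====
def Claim_equal_has_dot_before : Prop := ∀ (text : String) (word_pos : Int), Dom_has_dot_before text word_pos → Pre_has_dot_before text word_pos → Spec_has_dot_before text word_pos (has_dot_before text word_pos)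

-- ===== LEMMAS AND PROOFS =====

-- reference function: scan a (reversed) character list, skip whitespace, test the first other char
def checkRev : List Char → Bool
  | [] => false
  | c :: cs =>
    if PySem.Chars.isspace c then checkRev cs
    else (c == '.' || c == '!' || c == '?')

lemma pyRange_down (n : Nat) :
    PySem.List.pyRange ((n : Int) - 1) (-1) (-1) = (List.range n).map (fun k : Nat => (n : Int) - 1 - k) := by
  unfold PySem.List.pyRange
  have h1 : ((-1 : Int)) ≠ 0 := by decide
  simp only [if_neg h1]
  by_cases hn : (0 : Int) < n
  · rw [if_neg (by omega), if_pos (by omega)]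
    have hc : (((n : Int) - 1 - -1 + - -1 - 1) / - -1).toNat = n := by
      simp only [neg_neg, Int.ediv_one]
      omega
    rw [hc]
    apply List.map_congr_left
    intro k _
    ring
  · have hn0 : n = 0 := by omega
    subst hn0
    simp

lemma range_succ_map (n : Nat) :
    (List.range (n + 1)).map (fun k : Nat => ((n + 1 : Nat) : Int) - 1 - k)
      = (n : Int) :: (List.range n).map (fun k : Nat => (n : Int) - 1 - k) := by
  rw [List.range_succ_eq_map, List.map_cons, List.map_map]
  congr 1
  · push_cast
    ring
  · apply List.map_congr_left
    intro k _
    simp only [Function.comp]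
    push_cast
    ring

lemma loopA_eq_checkRev (cs : List Char) (n : Nat) (h : n ≤ cs.length) :
    hasDotLoopA cs (PySem.List.pyRange ((n : Int) - 1) (-1) (-1)) = checkRev ((cs.take n).reverse) := by
  induction n with
  | zero => simp [hasDotLoopA, checkRev]
  | succ m ih =>
    have hm : m < cs.length := by omega
    rw [pyRange_down, range_succ_map, ← pyRange_down]
    have hget : PySem.List.pyGet? cs ((m : Nat) : Int) = some cs[m] :=
      PySem.List.pyGet?_ofNat cs m hm
    have htake : (cs.take (m + 1)).reverse = cs[m] :: (cs.take m).reverse := by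
      rw [List.take_add_one, List.getElem?_eq_getElem hm]
      simp
    rw [htake]
    show hasDotLoopA cs ((m : Int) :: _) = _
    rw [hasDotLoopA, hget]
    simp only [checkRev]
    split_ifs with hsp
    · exact ih (by omega)
    · rfl

lemma checkRev_eq_dropWhile_head (l : List Char) :
    checkRev l =
      (match (List.dropWhile PySem.Chars.isspace l).head? with
        | none => false
        | some c => c == '.' || c == '!' || c == '?') := by
  induction l with
  | nil => simp [checkRev, List.dropWhile]
  | cons c cs ih =>
    rw [checkRev, List.dropWhile_cons]
    split_ifs with hsp
    · simpa using ih
    · simp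

-- the forward accumulator fold computes the last non-whitespace character,
-- i.e. the head of dropWhile isspace on the reversed list
lemma foldl_scan (l : List Char) (acc : Option Char) :
    l.foldl (fun acc c => if !(PySem.Chars.isspace c) then some c else acc) acc
      = (match (List.dropWhile PySem.Chars.isspace l.reverse).head? with
          | none => acc
          | some c => some c) := by
  induction l using List.reverseRecOn generalizing acc with
  | nil => simp
  | append_singleton xs c ih =>
    rw [List.foldl_append, List.foldl_cons, List.foldl_nil, List.reverse_append]
    simp only [List.reverse_cons, List.reverse_nil, List.nil_append, List.cons_append,
      List.dropWhile_cons]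
    by_cases hsp : PySem.Chars.isspace c = true
    · simp only [hsp, if_pos, Bool.not_true, Bool.false_eq_true, if_false]
      exact ih acc
    · simp only [hsp, Bool.not_eq_true] at hsp ⊢
      simp

lemma alt_eq_checkRev (text : String) (word_pos : Int) (hpos : 0 < word_pos) :
    has_dot_before_alt text word_pos = checkRev ((text.toList.take word_pos.toNat).reverse) := by
  unfold has_dot_before_alt
  rw [if_neg (by omega), checkRev_eq_dropWhile_head]
  show (match scanLastB (PySem.List.slice text.toList none (some word_pos)) with
        | none => false
        | some c => c == '.' || c == '!' || c == '?') = _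
  rw [PySem.List.slice_to text.toList (by omega)]
  unfold scanLastB
  rw [foldl_scan]
  cases (List.dropWhile PySem.Chars.isspace (text.toList.take word_pos.toNat).reverse).head? <;> rfl

-- empty descending range when word_pos < 0
lemma pyRange_empty_of_nonpos (w : Int) (hw : w ≤ 0) :
    PySem.List.pyRange (w - 1) (-1) (-1) = [] := by
  unfold PySem.List.pyRange
  have h1 : ((-1 : Int)) ≠ 0 := by decide
  simp only [if_neg h1]
  rw [if_neg (by omega), if_neg (by omega)]
  simp

-- ===== VERDICT (by name: the statement is the Claim_ definition above) =====
theorem has_dot_before_spec : Claim_equal_has_dot_before := by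
  intro text word_pos _ hpre
  unfold Spec_has_dot_before
  unfold Pre_has_dot_before at hpre
  by_cases h0 : word_pos = 0
  · subst h0
    simp [has_dot_before, has_dot_before_alt]
  · by_cases hneg : word_pos < 0
    · unfold has_dot_before has_dot_before_alt
      rw [if_neg h0, if_pos (by omega), pyRange_empty_of_nonpos word_pos (by omega)]
      rfl
    · have hpos : 0 < word_pos := by omega
      have hn : word_pos = ((word_pos.toNat : Nat) : Int) := by omega
      unfold has_dot_before
      rw [if_neg h0, alt_eq_checkRev text word_pos hpos, hn]
      exact loopA_eq_checkRev text.toList word_pos.toNat (by omega)
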